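-- pv_equiv track=rewrite | github.com/idelen/codingTestForPython | programmers/dev_match_2021/No1.py | solution
-- ===== SOURCE A (Python) =====
-- def solution(lottos, win_nums):
--     answer = []
--     zero_count = 0
--     win_count = 0
--
--     for lotto in lottos:
--         if lotto == 0:
--             zero_count += 1
--         else:
--             for win_num in win_nums:
--                 if lotto == win_num:
--                     win_count += 1
--                     break
--
--     if zero_count == 6:
--         answer = [1, 6]
--     elif win_count == 6:
--         answer = [1, 1]
--     else:
--         min_rank = (7 - win_count) if (7 - win_count) <= 6 else 6
--         total_count = win_count + zero_count
--         max_rank = (7 - total_count) if (7 - total_count) <= 6 else 6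
--         answer = [max_rank, min_rank]
--
--     return answer
-- ===== SOURCE B (Python) =====
-- def solution(lottos, win_nums):
--     freq = {}
--     for x in lottos:
--         freq[x] = freq.get(x, 0) + 1
--     zero_count = freq.get(0, 0)
--     win_count = sum(freq.get(w, 0) for w in set(win_nums) if w != 0)
--     if zero_count == 6:
--         return [1, 6]
--     if win_count == 6:
--         return [1, 1]
--     return [min(6, 7 - win_count - zero_count), min(6, 7 - win_count)]
-- ===== Notes on version B (the rewrite author's own statement) =====
-- stated objective: faster
-- what changed: Inverts the traversal: instead of scanning win_nums per lotto with a break, B builds a frequency histogram of lottos in one pass and then sums histogram entries over the distinct nonzero winning numbers, replacing the else-branch clamp arithmetic with min().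
import Mathlib
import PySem

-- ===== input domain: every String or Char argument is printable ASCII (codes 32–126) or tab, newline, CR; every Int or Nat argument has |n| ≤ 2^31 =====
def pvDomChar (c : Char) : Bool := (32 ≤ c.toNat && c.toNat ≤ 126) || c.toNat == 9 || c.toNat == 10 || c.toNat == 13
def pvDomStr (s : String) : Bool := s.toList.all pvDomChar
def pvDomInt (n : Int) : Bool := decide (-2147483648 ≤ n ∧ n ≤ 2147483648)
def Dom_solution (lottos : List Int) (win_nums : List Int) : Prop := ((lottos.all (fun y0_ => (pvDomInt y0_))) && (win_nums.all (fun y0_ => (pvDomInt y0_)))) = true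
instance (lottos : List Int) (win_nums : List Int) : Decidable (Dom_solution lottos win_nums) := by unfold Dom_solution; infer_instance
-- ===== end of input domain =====

-- B inverts the traversal: a histogram of lottos built once, summed over the distinct nonzero winning numbers, with min() replacing the clamp branches.


-- ===== PORT A =====
-- inner 'for win_num in win_nums: if lotto == win_num: win_count += 1; break'
def solInner (lotto : Int) : List Int → Int → Int
  | [], w => w
  | n :: rest, w => if lotto = n then w + 1 else solInner lotto rest w

def solution (lottos : List Int) (win_nums : List Int) : List Int :=
  let zw := lottos.foldl
    (fun (s : Int × Int) lotto =>
      if lotto = 0 then (s.1 + 1, s.2) else (s.1, solInner lotto win_nums s.2))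
    (0, 0)
  let zero_count := zw.1
  let win_count := zw.2
  if zero_count = 6 then [1, 6]
  else if win_count = 6 then [1, 1]
  else
    let min_rank := if 7 - win_count ≤ 6 then 7 - win_count else 6
    let total_count := win_count + zero_count
    let max_rank := if 7 - total_count ≤ 6 then 7 - total_count else 6
    [max_rank, min_rank]

-- ===== PORT B =====
def solution_alt (lottos : List Int) (win_nums : List Int) : List Int :=
  let freq : PySem.Dict Int Int :=
    lottos.foldl (fun d x => d.insert x (d.getD x 0 + 1)) PySem.Dict.empty
  let zero_count : Int := freq.getD 0 0
  let win_count : Int :=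
    (((PySem.Set.ofList win_nums).filter (fun w => w != 0)).map
      (fun w => freq.getD w 0)).sum
  if zero_count = 6 then [1, 6]
  else if win_count = 6 then [1, 1]
  else [min 6 (7 - win_count - zero_count), min 6 (7 - win_count)]

-- ===== PRECONDITION & SPEC =====
def Spec_solution (lottos : List Int) (win_nums : List Int) (out : List Int) : Prop := out = solution_alt lottos win_nums
instance (lottos : List Int) (win_nums : List Int) (out : List Int) : Decidable (Spec_solution lottos win_nums out) := by unfold Spec_solution; infer_instance

-- ===== CLAIM (what is proved, stated in full; the proofs are below) =====
def Claim_equal_solution : Prop := ∀ (lottos : List Int) (win_nums : List Int), Dom_solution lottos win_nums → Spec_solution lottos win_nums (solution lottos win_nums)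

-- ===== LEMMAS AND PROOFS =====

-- A's inner break-loop adds 1 exactly when lotto occurs in win_nums.
theorem solInner_eq (lotto : Int) (ws : List Int) (w : Int) :
    solInner lotto ws w = w + (if lotto ∈ ws then 1 else 0) := by
  induction ws with
  | nil => simp [solInner]
  | cons n rest ih =>
    by_cases h : lotto = n
    · simp [solInner, h]
    · simp [solInner, h, ih, List.mem_cons]

-- A's counting fold computes (#zeros, #nonzero lottos occurring in win_nums).
theorem foldA_eq (win_nums : List Int) (lottos : List Int) (z w : Int) :
    lottos.foldl
      (fun (s : Int × Int) lotto =>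
        if lotto = 0 then (s.1 + 1, s.2) else (s.1, solInner lotto win_nums s.2))
      (z, w)
    = (z + (lottos.count 0 : Nat),
       w + (lottos.countP (fun x => x != 0 && decide (x ∈ win_nums)) : Nat)) := by
  induction lottos generalizing z w with
  | nil => simp
  | cons x rest ih =>
    rw [List.foldl_cons]
    by_cases hx : x = 0
    · rw [if_pos hx, ih]
      subst hx
      simp [Prod.ext_iff]
      omega
    · rw [if_neg hx, ih, solInner_eq]
      by_cases hm : x ∈ win_nums
      · simp [hx, hm, Prod.ext_iff]; omega
      · simp [hx, hm]

-- Summing per-value counts over a duplicate-free value list is one filtered count of l.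
theorem sum_counts (S : List Int) (hS : S.Nodup) (l : List Int) :
    ((S.filter (fun w => w != (0:Int))).map (fun w => ((l.count w : Nat) : Int))).sum
      = (l.countP (fun x => x != 0 && decide (x ∈ S)) : Nat) := by
  induction l with
  | nil => simp
  | cons x l ih =>
    simp only [List.count_cons, List.countP_cons]
    push_cast
    rw [PySem.List.sum_map_add_int (f := fun w => ((l.count w : Nat) : Int))
        (g := fun w => if x == w then 1 else 0)]
    rw [PySem.List.sum_map_ite_one_zero]
    rw [ih]
    have hcnt : (S.filter (fun w => w != (0:Int))).countP (fun w => x == w)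
        = (S.filter (fun w => w != (0:Int))).count x := by
      rw [List.count]
      exact List.countP_congr (by intro a _; by_cases h : a = x <;> simp [h, Ne.symm])
    by_cases hx : x = 0
    · subst hx
      simp [hcnt, List.count_eq_zero]
    · by_cases hm : x ∈ S
      · have hmem : x ∈ S.filter (fun w => w != (0:Int)) := by
          simp [List.mem_filter, hm, hx]
        have h1 : (S.filter (fun w => w != (0:Int))).count x = 1 :=
          List.count_eq_one_of_mem (hS.filter _) hmem
        simp [hcnt, h1, hx, hm]
      · have h0 : (S.filter (fun w => w != (0:Int))).count x = 0 := by
          simp [List.count_eq_zero, List.mem_filter, hm]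
        simp [hcnt, h0, hm]

-- B's histogram lookup is a count of lottos.
theorem freq_getD (lottos : List Int) (v : Int) :
    (lottos.foldl (fun (d : PySem.Dict Int Int) x => d.insert x (d.getD x 0 + 1))
        PySem.Dict.empty).getD v 0 = (lottos.count v : Nat) := by
  rw [PySem.Dict.getD_foldl_insert_add_one]
  simp

-- ===== VERDICT (by name: the statement is the Claim_ definition above) =====
theorem solution_spec : Claim_equal_solution := by
  intro lottos win_nums _
  show solution lottos win_nums = solution_alt lottos win_nums
  unfold solution solution_alt
  rw [foldA_eq]
  simp only [freq_getD, zero_add]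
  rw [sum_counts (PySem.Set.ofList win_nums) (PySem.Set.nodup_ofList win_nums) lottos]
  have hP : lottos.countP (fun x => x != 0 && decide (x ∈ PySem.Set.ofList win_nums))
      = lottos.countP (fun x => x != 0 && decide (x ∈ win_nums)) :=
    List.countP_congr (by intro a _; simp [PySem.Set.mem_ofList])
  rw [hP]
  split_ifs <;> first
    | rfl
    | (simp only [List.cons.injEq, and_true]; constructor) <;> omega
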